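-- pv_equiv track=rewrite | github.com/Rcassell22/LeetCode | Python/medium/medium_problem_2140.py | most_points
-- ===== SOURCE A (Python) =====
-- def most_points(questions):
--     n = len(questions)
--     dp = [0] * (n+1)
--     for i in range(n-1, -1, -1):
--         points, skip = questions[i]
--         sub_questions_start = i + skip + 1
--         sub_score = 0
--         if sub_questions_start < n:
--             sub_score = dp[sub_questions_start]
--         dp[i] = max(points + sub_score, dp[i+1])
--     return dp[0]
-- ===== SOURCE B (Python) =====
-- def most_points(questions):
--     n = len(questions)
--     best = [0] * (n + 1)  # best[i] = highest score with which one can arrive at question i; best[n] = final answer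
--     for i, (points, skip) in enumerate(questions):
--         # skip question i
--         if best[i] > best[i + 1]:
--             best[i + 1] = best[i]
--         # answer question i: continue at i + skip + 1 if that is a later question, else the exam ends
--         nxt = i + skip + 1
--         if not (i < nxt < n):
--             nxt = n
--         if best[i] + points > best[nxt]:
--             best[nxt] = best[i] + points
--     return best[n]
-- ===== Notes on version B (the rewrite author's own statement) =====
-- stated objective: alternative
-- what changed: Replaces A's backward pull DP (dp[i] computed from later cells, reading dp[i+skip+1] by index) with a forward push DP over arrival scores: best[i] is propagated ahead to best[i+1] (skip) and to the clamped jump target (answer), and the answer is read at best[n].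
-- outside the precondition, e.g. on most_points([(4, -3), (0, 4), (6, 2)]): A returns 10, B returns 6
import Mathlib
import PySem

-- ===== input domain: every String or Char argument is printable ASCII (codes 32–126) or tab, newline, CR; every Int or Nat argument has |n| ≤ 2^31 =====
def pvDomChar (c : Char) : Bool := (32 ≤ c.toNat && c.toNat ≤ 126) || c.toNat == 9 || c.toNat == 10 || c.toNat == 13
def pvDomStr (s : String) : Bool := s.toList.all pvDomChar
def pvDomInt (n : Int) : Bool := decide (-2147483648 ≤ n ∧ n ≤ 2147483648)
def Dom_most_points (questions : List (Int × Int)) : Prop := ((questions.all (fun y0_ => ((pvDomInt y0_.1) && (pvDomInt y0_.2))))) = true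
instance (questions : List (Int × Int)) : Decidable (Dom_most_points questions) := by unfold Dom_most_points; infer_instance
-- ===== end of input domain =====

-- B replaces A's backward pull DP by a forward push DP over arrival scores (same O(n) cost, different decomposition);
-- equality is proved on Pre_, which keeps every jump index i+skip+1 nonnegative.

-- ===== PORT A =====
-- one loop iteration of A at index i (the Python loop variable i is always a nonnegative in-range index,
-- so it is carried as a Nat; dp[i] = v is dp.set i v, dp[sub_questions_start] is pyGet? — the index may be negative)
def pvAStep (q : List (Int × Int)) (n : Int) (dp : List Int) (i : Nat) : List Int :=
  let pq := (PySem.List.pyGet? q (i : Int)).getD (0, 0)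
  let points := pq.1
  let skip := pq.2
  let sub_questions_start : Int := (i : Int) + skip + 1
  let sub_score : Int :=
    if sub_questions_start < n then (PySem.List.pyGet? dp sub_questions_start).getD 0 else 0
  dp.set i (max (points + sub_score) ((PySem.List.pyGet? dp ((i : Int) + 1)).getD 0))

-- for i in range(n-1, -1, -1): counter k+1 means the next iteration uses i = k
def pvALoop (q : List (Int × Int)) (n : Int) : Nat → List Int → List Int
  | 0, dp => dp
  | k + 1, dp => pvALoop q n k (pvAStep q n dp k)

def most_points (questions : List (Int × Int)) : Int :=
  let n : Int := questions.length
  let dp : List Int := List.replicate (questions.length + 1) 0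
  (PySem.List.pyGet? (pvALoop questions n questions.length dp) 0).getD 0

-- ===== PORT B =====
-- forward push loop of Source B: recursion over the questions carrying the enumerate index i
def pvBLoop (n : Nat) : Nat → List (Int × Int) → List Int → List Int
  | _, [], dp => dp
  | i, (points, skip) :: rest, dp =>
      let dp1 := if dp.getD i 0 > dp.getD (i + 1) 0 then dp.set (i + 1) (dp.getD i 0) else dp
      let s : Int := (i : Int) + skip + 1
      let nxt : Nat := if (i : Int) < s ∧ s < (n : Int) then s.toNat else n
      let dp2 := if dp1.getD i 0 + points > dp1.getD nxt 0 then dp1.set nxt (dp1.getD i 0 + points) else dp1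
      pvBLoop n (i + 1) rest dp2

def most_points_alt (questions : List (Int × Int)) : Int :=
  (pvBLoop questions.length 0 questions (List.replicate (questions.length + 1) 0)).getD questions.length 0

-- ===== PRECONDITION & SPEC =====
-- Pre_ restricts to the task's natural domain: every jump index i+skip+1 is nonnegative. Outside it A either
-- raises IndexError (jump index < -(n+1)) or reads dp through Python's negative-index wraparound, an artefact
-- of A's backward array indexing; B there treats a non-forward jump as ending the exam.
def Pre_most_points (questions : List (Int × Int)) : Prop :=
  ∀ i ∈ List.range questions.length, 0 ≤ (i : Int) + (questions.getD i (0, 0)).2 + 1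
instance (questions : List (Int × Int)) : Decidable (Pre_most_points questions) := by
  unfold Pre_most_points; infer_instance

def pvWitness_most_points : (List (Int × Int)) := [(5, 0), (3, 1)]

def Spec_most_points (questions : List (Int × Int)) (out : Int) : Prop := out = most_points_alt questions
instance (questions : List (Int × Int)) (out : Int) : Decidable (Spec_most_points questions out) := by
  unfold Spec_most_points; infer_instance

-- ===== CLAIM (what is proved, stated in full; the proofs are below) =====
def Claim_equal_most_points : Prop := ∀ (questions : List (Int × Int)), Dom_most_points questions → Pre_most_points questions → Spec_most_points questions (most_points questions)

-- ===== LEMMAS AND PROOFS =====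

-- the common mathematical value: pvG q i = best score obtainable from question i on
def pvG (q : List (Int × Int)) (i : Nat) : Int :=
  if h : i < q.length then
    max ((q.getD i (0, 0)).1 +
        (if hs : (i : Int) < (i : Int) + (q.getD i (0, 0)).2 + 1 ∧
            (i : Int) + (q.getD i (0, 0)).2 + 1 < (q.length : Int) then
          pvG q ((i : Int) + (q.getD i (0, 0)).2 + 1).toNat
        else 0))
      (pvG q (i + 1))
  else 0
termination_by q.length - i
decreasing_by
  · omega
  · omega

theorem pvG_stop (q : List (Int × Int)) (i : Nat) (h : q.length ≤ i) : pvG q i = 0 := by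
  rw [pvG]; simp [Nat.not_lt.mpr h]

theorem pvG_succ_le (q : List (Int × Int)) (i : Nat) : pvG q (i + 1) ≤ pvG q i := by
  by_cases h : i < q.length
  · conv_rhs => rw [pvG]
    rw [dif_pos h]; exact le_max_right _ _
  · rw [pvG_stop q i (Nat.not_lt.mp h), pvG_stop q (i + 1) (by omega)]

-- max over k ∈ [i, n] of dp[k] + pvG q k (with pvG q.length = 0 folded into the base case)
def pvM (q : List (Int × Int)) (dp : List Int) (i : Nat) : Int :=
  if h : i < q.length then max (dp.getD i 0 + pvG q i) (pvM q dp (i + 1))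
  else dp.getD q.length 0
termination_by q.length - i
decreasing_by omega

theorem pvM_stop (q : List (Int × Int)) (dp : List Int) (i : Nat) (h : q.length ≤ i) :
    pvM q dp i = dp.getD q.length 0 := by
  rw [pvM]; simp [Nat.not_lt.mpr h]

-- getD/set bookkeeping
theorem pvGetD_set_ne (dp : List Int) (k j : Nat) (w d : Int) (h : k ≠ j) :
    (dp.set k w).getD j d = dp.getD j d := by
  simp [List.getD_eq_getElem?_getD, List.getElem?_set_ne h]

theorem pvGetD_set_self (dp : List Int) (k : Nat) (w d : Int) (h : k < dp.length) :
    (dp.set k w).getD k d = w := by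
  simp [List.getD_eq_getElem?_getD, h]

theorem pvSet_getD_self (dp : List Int) (k : Nat) (d : Int) (h : k < dp.length) :
    dp.set k (dp.getD k d) = dp := by
  apply List.ext_getElem?
  intro j
  rcases eq_or_ne k j with rfl | hne
  · simp [h, List.getD_eq_getElem?_getD]
  · simp [List.getElem?_set_ne hne]

theorem pvM_set_lt (q : List (Int × Int)) (dp : List Int) (k j : Nat) (w : Int)
    (hkj : k < j) (hj : j ≤ q.length) :
    pvM q (dp.set k w) j = pvM q dp j := by
  by_cases h : j < q.length
  · conv_lhs => rw [pvM]
    conv_rhs => rw [pvM]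
    rw [dif_pos h, dif_pos h,
      pvM_set_lt q dp k (j + 1) w (by omega) (by omega),
      pvGetD_set_ne dp k j w 0 (by omega)]
  · rw [pvM_stop _ _ _ (by omega), pvM_stop _ _ _ (by omega),
      pvGetD_set_ne dp k q.length w 0 (by omega)]
termination_by q.length - j

theorem pvM_set_max (q : List (Int × Int)) (dp : List Int) (j k : Nat) (v : Int)
    (hjk : j ≤ k) (hk : k ≤ q.length) (hd : dp.length = q.length + 1) :
    pvM q (dp.set k (max (dp.getD k 0) v)) j = max (pvM q dp j) (v + pvG q k) := by
  rcases Nat.lt_or_ge j k with hlt | hge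
  · -- j < k ≤ q.length, so j < q.length: the entry at j is unchanged, recurse
    conv_lhs => rw [pvM]
    conv_rhs => rw [pvM]
    rw [dif_pos (by omega : j < q.length), dif_pos (by omega : j < q.length),
      pvM_set_max q dp (j + 1) k v (by omega) hk hd,
      pvGetD_set_ne dp k j _ 0 (by omega)]
    omega
  · have hjk' : j = k := by omega
    subst hjk'
    rcases Nat.lt_or_ge j q.length with hj | hj
    · conv_lhs => rw [pvM]
      conv_rhs => rw [pvM]
      rw [dif_pos hj, dif_pos hj,
        pvM_set_lt q dp j (j + 1) _ (by omega) (by omega),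
        pvGetD_set_self dp j _ 0 (by omega)]
      omega
    · have hje : j = q.length := by omega
      subst hje
      rw [pvM_stop _ _ _ le_rfl, pvM_stop _ _ _ le_rfl,
        pvGetD_set_self dp _ _ 0 (by omega), pvG_stop q _ le_rfl]
      omega
termination_by k - j

theorem pvM_replicate (q : List (Int × Int)) (i : Nat) (hi : i ≤ q.length) :
    pvM q (List.replicate (q.length + 1) 0) i = pvG q i := by
  rcases Nat.lt_or_ge i q.length with h | h
  · conv_lhs => rw [pvM]
    rw [dif_pos h, pvM_replicate q (i + 1) (by omega)]
    have hz : (List.replicate (q.length + 1) (0 : Int)).getD i 0 = 0 := by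
      simp [List.getD_eq_getElem?_getD, hi]
    rw [hz, zero_add]
    exact max_eq_left (pvG_succ_le q i)
  · have hie : i = q.length := by omega
    subst hie
    rw [pvM_stop _ _ _ le_rfl, pvG_stop q _ le_rfl]
    simp [List.getD_eq_getElem?_getD]
termination_by q.length - i

theorem pvBLoop_inv (q : List (Int × Int)) (i : Nat) (dp : List Int)
    (hi : i ≤ q.length) (hd : dp.length = q.length + 1) :
    (pvBLoop q.length i (q.drop i) dp).getD q.length 0 = pvM q dp i := by
  rcases Nat.lt_or_ge i q.length with h | h
  · obtain ⟨points, skip, hq⟩ : ∃ p s, q[i]'h = (p, s) := ⟨_, _, rfl⟩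
    rw [List.drop_eq_getElem_cons h, hq, pvBLoop]
    have e1 : (if dp.getD i 0 > dp.getD (i + 1) 0 then dp.set (i + 1) (dp.getD i 0) else dp)
        = dp.set (i + 1) (max (dp.getD (i + 1) 0) (dp.getD i 0)) := by
      split_ifs with h'
      · rw [max_eq_right (le_of_lt h')]
      · rw [max_eq_left (not_lt.mp h'), pvSet_getD_self dp (i + 1) 0 (by omega)]
    rw [e1]
    set dp1 : List Int := dp.set (i + 1) (max (dp.getD (i + 1) 0) (dp.getD i 0)) with hdp1
    set s : Int := (i : Int) + skip + 1 with hs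
    set nxt : Nat := if (i : Int) < s ∧ s < (q.length : Int) then s.toNat else q.length with hnxt
    have hnxt1 : i + 1 ≤ nxt := by
      rw [hnxt]; split_ifs with hc
      · omega
      · omega
    have hnxt2 : nxt ≤ q.length := by
      rw [hnxt]; split_ifs with hc
      · omega
      · omega
    have hd1 : dp1.length = q.length + 1 := by rw [hdp1, List.length_set, hd]
    have e2 : (if dp1.getD i 0 + points > dp1.getD nxt 0 then dp1.set nxt (dp1.getD i 0 + points) else dp1)
        = dp1.set nxt (max (dp1.getD nxt 0) (dp1.getD i 0 + points)) := by
      split_ifs with h'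
      · rw [max_eq_right (le_of_lt h')]
      · rw [max_eq_left (not_lt.mp h'), pvSet_getD_self dp1 nxt 0 (by omega)]
    rw [e2, pvBLoop_inv q (i + 1) _ (by omega) (by rw [List.length_set, hd1]),
      pvM_set_max q dp1 (i + 1) nxt (dp1.getD i 0 + points) hnxt1 hnxt2 hd1,
      pvM_set_max q dp (i + 1) (i + 1) (dp.getD i 0) le_rfl (by omega) hd]
    have hd1i : dp1.getD i 0 = dp.getD i 0 := pvGetD_set_ne dp (i + 1) i _ 0 (by omega)
    have hGnxt : pvG q nxt = if (i : Int) < s ∧ s < (q.length : Int) then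
        pvG q s.toNat else 0 := by
      rw [hnxt]; split_ifs with hc
      · rfl
      · exact pvG_stop q _ le_rfl
    conv_rhs => rw [pvM]
    rw [dif_pos h]
    have hGi : pvG q i = max ((points : Int) +
        (if (i : Int) < s ∧ s < (q.length : Int) then pvG q s.toNat else 0)) (pvG q (i + 1)) := by
      conv_lhs => rw [pvG]
      rw [dif_pos h]
      have : q.getD i (0, 0) = (points, skip) := by
        rw [List.getD_eq_getElem?_getD, List.getElem?_eq_getElem h, hq]; rfl
      rw [this]
      simp only [dite_eq_ite, hs]
    rw [hd1i, hGnxt, hGi]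
    omega
  · have hie : i = q.length := by omega
    subst hie
    rw [List.drop_length, pvBLoop, pvM_stop _ _ _ le_rfl]
termination_by q.length - i

theorem pvALoop_inv (q : List (Int × Int)) (pre : Pre_most_points q) (k : Nat) (dp : List Int)
    (hk : k ≤ q.length) (hd : dp.length = q.length + 1)
    (hdp : ∀ j, dp.getD j 0 = if k ≤ j ∧ j ≤ q.length then pvG q j else 0) :
    ∀ j, j ≤ q.length → (pvALoop q (q.length : Int) k dp).getD j 0 = pvG q j := by
  induction k generalizing dp with
  | zero =>
    intro j hj
    rw [pvALoop, hdp j]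
    simp [hj]
  | succ k ih =>
    rw [pvALoop]
    have hkl : k < q.length := by omega
    have hpre : 0 ≤ (k : Int) + (q.getD k (0, 0)).2 + 1 := pre k (List.mem_range.mpr hkl)
    have key : ∀ j', (pvAStep q (q.length : Int) dp k).getD j' 0 =
        if k ≤ j' ∧ j' ≤ q.length then pvG q j' else 0 := by
      intro j'
      unfold pvAStep
      dsimp only
      have hpq : (PySem.List.pyGet? q (k : Int)).getD (0, 0) = q.getD k (0, 0) := by
        rw [PySem.List.pyGet?_natCast, List.getD_eq_getElem?_getD]
      have hread1 : (PySem.List.pyGet? dp ((k : Int) + 1)).getD 0 = pvG q (k + 1) := by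
        have : ((k : Int) + 1) = ((k + 1 : Nat) : Int) := by push_cast; ring
        rw [this, PySem.List.pyGet?_natCast, ← List.getD_eq_getElem?_getD, hdp (k + 1)]
        simp [Nat.succ_le_of_lt hkl]
      rw [hpq, hread1]
      set s : Int := (k : Int) + (q.getD k (0, 0)).2 + 1 with hs
      have hsub : (if s < (q.length : Int) then (PySem.List.pyGet? dp s).getD 0 else 0)
          = (if (k : Int) < s ∧ s < (q.length : Int) then pvG q s.toNat else 0) := by
        by_cases hlt : s < (q.length : Int)
        · rw [if_pos hlt]
          have h0 : (0 : Int) ≤ s := hpre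
          have htn : s.toNat < dp.length := by omega
          rw [PySem.List.pyGet?_of_nonneg dp h0, List.getElem?_eq_getElem htn,
            Option.getD_some]
          have : dp[s.toNat] = dp.getD s.toNat 0 := by
            rw [List.getD_eq_getElem?_getD, List.getElem?_eq_getElem htn, Option.getD_some]
          rw [this, hdp s.toNat]
          by_cases hks : (k : Int) < s
          · rw [if_pos (show k + 1 ≤ s.toNat ∧ s.toNat ≤ q.length by omega),
              if_pos ⟨hks, hlt⟩]
          · rw [if_neg (show ¬(k + 1 ≤ s.toNat ∧ s.toNat ≤ q.length) by omega),
              if_neg (show ¬((k : Int) < s ∧ s < (q.length : Int)) by omega)]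
        · rw [if_neg hlt, if_neg (show ¬((k : Int) < s ∧ s < (q.length : Int)) by omega)]
      rw [hsub]
      rcases eq_or_ne k j' with rfl | hne
      · rw [pvGetD_set_self dp k _ 0 (by omega),
          if_pos (⟨le_rfl, by omega⟩ : k ≤ k ∧ k ≤ q.length)]
        conv_rhs => rw [pvG]
        rw [dif_pos hkl]
        simp only [dite_eq_ite, hs]
      · rw [pvGetD_set_ne dp k j' _ 0 hne, hdp j']
        by_cases hcond : k + 1 ≤ j' ∧ j' ≤ q.length
        · rw [if_pos hcond, if_pos (by omega)]
        · rw [if_neg hcond, if_neg (by omega)]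
    exact ih (pvAStep q (q.length : Int) dp k) (by omega)
      (by unfold pvAStep; rw [List.length_set, hd]) key

-- ===== VERDICT (by name: the statement is the Claim_ definition above) =====
theorem most_points_spec : Claim_equal_most_points := by
  intro q _hdom hpre
  unfold Spec_most_points most_points most_points_alt
  dsimp only
  have hrep : ∀ j : Nat, (List.replicate (q.length + 1) (0 : Int)).getD j 0 =
      if q.length ≤ j ∧ j ≤ q.length then pvG q j else 0 := by
    intro j
    have hz : (List.replicate (q.length + 1) (0 : Int)).getD j 0 = 0 := by
      rw [List.getD_eq_getElem?_getD, List.getElem?_replicate]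
      split <;> rfl
    rw [hz]
    split_ifs with hc
    · rw [show j = q.length from by omega, pvG_stop q _ le_rfl]
    · rfl
  have hA := pvALoop_inv q hpre q.length _ le_rfl (by simp) hrep 0 (by omega)
  have hB := pvBLoop_inv q 0 (List.replicate (q.length + 1) 0) (by omega) (by simp)
  rw [List.drop_zero] at hB
  rw [hB, pvM_replicate q 0 (by omega), PySem.List.pyGet?_zero,
    ← List.getD_eq_getElem?_getD, hA]
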